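-- pv_equiv track=rewrite | github.com/krishsharma1008/central_Inteligence | src/attachments/chunking.py | _find_nearest_boundary
-- ===== SOURCE A (Python) =====
-- from typing import List, Dict, Any
--
-- def _find_nearest_boundary(boundaries: List[int], position: int) -> int:
--     """
--     Find the nearest boundary at or after the given position.
--
--     Args:
--         boundaries: Sorted list of boundary positions
--         position: Target position
--
--     Returns:
--         Nearest boundary position or None if not found
--     """
--     # Binary search for nearest boundary >= position
--     left, right = 0, len(boundaries) - 1
--
--     while left <= right:
--         mid = (left + right) // 2
--         if boundaries[mid] < position:
--             left = mid + 1
--         elif boundaries[mid] > position: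
--             right = mid - 1
--         else:
--             return boundaries[mid]
--
--     # Return the boundary at 'left' if it exists
--     if left < len(boundaries):
--         return boundaries[left]
--
--     return None
-- ===== SOURCE B (Python) =====
-- def _find_nearest_boundary(boundaries, position):
--     for b in boundaries:
--         if b >= position:
--             return b
--     return None
-- ===== Notes on version B (the rewrite author's own statement) =====
-- stated objective: simpler
-- what changed: Replaced the hand-written binary search (left/right/mid loop) with a single forward scan returning the first boundary >= position; Pre_ excludes unsorted lists of length >= 3, where A's binary search returns an accidental element depending on probe order although the docstring requires sorted input (length <= 2 lists are kept, sorted or not).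
-- outside the precondition, e.g. on _find_nearest_boundary([5, 1, 2], 2): A returns 2, B returns 5
import Mathlib
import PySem

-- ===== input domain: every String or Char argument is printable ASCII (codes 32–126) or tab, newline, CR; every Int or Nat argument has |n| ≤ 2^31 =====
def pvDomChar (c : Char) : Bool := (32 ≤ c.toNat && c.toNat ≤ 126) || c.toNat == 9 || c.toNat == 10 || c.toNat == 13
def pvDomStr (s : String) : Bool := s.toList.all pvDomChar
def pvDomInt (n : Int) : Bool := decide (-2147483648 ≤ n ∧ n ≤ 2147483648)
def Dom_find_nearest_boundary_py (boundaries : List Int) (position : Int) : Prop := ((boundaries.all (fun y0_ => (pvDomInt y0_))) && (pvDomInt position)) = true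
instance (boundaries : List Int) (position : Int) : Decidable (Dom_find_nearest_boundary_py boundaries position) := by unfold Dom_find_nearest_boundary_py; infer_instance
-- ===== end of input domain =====

-- B replaces A's hand-written binary search with one forward scan returning the first
-- boundary >= position (simpler); equal on the sorted lists the docstring promises (Pre_).

-- ===== PORT A =====
-- the while-loop of A: state (left, right); terminates because right + 1 - left shrinks
def pvFindLoop (boundaries : List Int) (position left right : Int) : Option Int :=
  if h : left ≤ right then
    let mid := PySem.Int.floordiv (left + right) 2
    match PySem.List.pyGet? boundaries mid with
    | none => none   -- IndexError; unreachable under the loop's 0 ≤ left, right < len invariant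
    | some v =>
      if v < position then pvFindLoop boundaries position (mid + 1) right
      else if v > position then pvFindLoop boundaries position left (mid - 1)
      else some v
  else if left < (boundaries.length : Int) then PySem.List.pyGet? boundaries left
  else none
termination_by (right + 1 - left).toNat
decreasing_by
  all_goals
    have := PySem.Int.floordiv_two_mid_bounds h
    omega

def find_nearest_boundary_py (boundaries : List Int) (position : Int) : Option Int :=
  pvFindLoop boundaries position 0 ((boundaries.length : Int) - 1)

-- ===== PORT B =====
def find_nearest_boundary_py_alt (boundaries : List Int) (position : Int) : Option Int :=
  match boundaries with
  | [] => none
  | b :: rest => if b ≥ position then some b else find_nearest_boundary_py_alt rest position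

-- ===== PRECONDITION & SPEC =====
-- Pre_ excludes unsorted lists of length ≥ 3 (the docstring requires sorted input; there
-- A's binary search returns whatever its probe order happens to hit, an accidental value);
-- lists of length ≤ 2 are kept even when unsorted because both programs agree on them.
def Pre_find_nearest_boundary_py (boundaries : List Int) (position : Int) : Prop :=
  boundaries.Pairwise (· ≤ ·) ∨ boundaries.length ≤ 2
instance (boundaries : List Int) (position : Int) : Decidable (Pre_find_nearest_boundary_py boundaries position) := by unfold Pre_find_nearest_boundary_py; infer_instance

def pvWitness_find_nearest_boundary_py : List Int × Int := ([1, 3, 3, 7], 4)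

def Spec_find_nearest_boundary_py (boundaries : List Int) (position : Int) (out : Option Int) : Prop := out = find_nearest_boundary_py_alt boundaries position
instance (boundaries : List Int) (position : Int) (out : Option Int) : Decidable (Spec_find_nearest_boundary_py boundaries position out) := by unfold Spec_find_nearest_boundary_py; infer_instance

-- ===== CLAIM (what is proved, stated in full; the proofs are below) =====
def Claim_equal_find_nearest_boundary_py : Prop := ∀ (boundaries : List Int) (position : Int), Dom_find_nearest_boundary_py boundaries position → Pre_find_nearest_boundary_py boundaries position → Spec_find_nearest_boundary_py boundaries position (find_nearest_boundary_py boundaries position)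

-- ===== LEMMAS AND PROOFS =====

-- in a non-decreasing list, earlier elements are ≤ later ones
theorem pvSorted_le (bs : List Int) (hs : bs.Pairwise (· ≤ ·)) (i j : Nat)
    (hi : i < bs.length) (hj : j < bs.length) (hij : i ≤ j) : bs[i] ≤ bs[j] := by
  rcases Nat.eq_or_lt_of_le hij with heq | hlt
  · subst heq; exact le_refl _
  · exact List.pairwise_iff_getElem.mp hs i j hi hj hlt

-- B returns none when every element is below position
theorem pvAlt_none (bs : List Int) (p : Int) (h : ∀ b ∈ bs, b < p) :
    find_nearest_boundary_py_alt bs p = none := by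
  induction bs with
  | nil => rfl
  | cons b rest ih =>
    have hb := h b (by simp)
    rw [find_nearest_boundary_py_alt]
    simp only [if_neg (by omega : ¬ b ≥ p)]
    exact ih (fun x hx => h x (by simp [hx]))

-- B returns bs[k] when k is the first index whose element is ≥ p
theorem pvAlt_first (bs : List Int) (p : Int) (k : Nat) (hk : k < bs.length)
    (hlow : ∀ i, (hi : i < bs.length) → i < k → bs[i] < p) (hge : p ≤ bs[k]) :
    find_nearest_boundary_py_alt bs p = some bs[k] := by
  induction bs generalizing k with
  | nil => simp at hk
  | cons b rest ih =>
    rw [find_nearest_boundary_py_alt]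
    cases k with
    | zero => simp_all
    | succ k =>
      have hb : b < p := hlow 0 (by simp) (by omega)
      simp only [if_neg (by omega : ¬ b ≥ p)]
      have := ih k (by simpa using hk)
        (fun i hi hik => by simpa using hlow (i+1) (by simpa using hi) (by omega))
        (by simpa using hge)
      simpa using this

-- on a sorted list, if some element at index k is ≥ p then B returns a value between p and bs[k]
theorem pvAlt_between (bs : List Int) (p : Int) (hs : bs.Pairwise (· ≤ ·))
    (k : Nat) (hk : k < bs.length) (hge : p ≤ bs[k]) :
    ∃ v, find_nearest_boundary_py_alt bs p = some v ∧ p ≤ v ∧ v ≤ bs[k] := by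
  induction bs generalizing k with
  | nil => simp at hk
  | cons b rest ih =>
    rw [find_nearest_boundary_py_alt]
    by_cases hb : b ≥ p
    · refine ⟨b, by simp [hb], hb, ?_⟩
      cases k with
      | zero => simp
      | succ k =>
        have hk' : k < rest.length := by simp at hk; omega
        simpa using (List.pairwise_cons.mp hs).1 _ (List.getElem_mem hk')
    · simp only [if_neg hb]
      cases k with
      | zero => simp at hge; omega
      | succ k =>
        obtain ⟨v, hv, hpv, hvk⟩ := ih (List.pairwise_cons.mp hs).2 k (by simpa using hk)
          (by simpa using hge)
        exact ⟨v, hv, hpv, by simpa using hvk⟩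

-- the binary-search loop equals B under its invariant
theorem pvLoop_eq (bs : List Int) (p : Int) (hs : bs.Pairwise (· ≤ ·)) :
    ∀ (n : Nat) (left right : Int), (right + 1 - left).toNat ≤ n →
    0 ≤ left → left ≤ right + 1 → right < (bs.length : Int) →
    (∀ i, (hi : i < bs.length) → (i : Int) < left → bs[i] < p) →
    (∀ i, (hi : i < bs.length) → right < (i : Int) → p < bs[i]) →
    pvFindLoop bs p left right = find_nearest_boundary_py_alt bs p := by
  intro n
  induction n with
  | zero =>
    intro left right hn h0 hlr hrl hlow hhigh
    have hle : ¬ left ≤ right := by omega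
    rw [pvFindLoop, dif_neg hle]
    by_cases hlen : left < (bs.length : Int)
    · rw [if_pos hlen]
      have hk : left.toNat < bs.length := by omega
      have hcast : (left.toNat : Int) = left := by omega
      rw [PySem.List.pyGet?_of_nonneg bs h0, List.getElem?_eq_getElem hk]
      refine (pvAlt_first bs p left.toNat hk
        (fun i hi hik => hlow i hi (by omega)) ?_).symm
      exact le_of_lt (hhigh left.toNat hk (by omega))
    · rw [if_neg hlen]
      refine (pvAlt_none bs p (fun b hb => ?_)).symm
      obtain ⟨i, hi, rfl⟩ := List.mem_iff_getElem.mp hb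
      exact hlow i hi (by omega)
  | succ n ih =>
    intro left right hn h0 hlr hrl hlow hhigh
    by_cases hle : left ≤ right
    · rw [pvFindLoop, dif_pos hle]
      have hmid := PySem.Int.floordiv_two_mid_bounds hle
      set mid := PySem.Int.floordiv (left + right) 2 with hmiddef
      have hmid0 : 0 ≤ mid := by omega
      have hmidlen : mid.toNat < bs.length := by omega
      have hcast : (mid.toNat : Int) = mid := by omega
      simp only [PySem.List.pyGet?_of_nonneg bs hmid0, List.getElem?_eq_getElem hmidlen]
      by_cases hvlt : bs[mid.toNat] < p
      · rw [if_pos hvlt]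
        refine ih (mid + 1) right (by omega) (by omega) (by omega) hrl ?_ hhigh
        intro i hi hil
        rcases lt_or_ge (i : Int) left with h | h
        · exact hlow i hi h
        · have : bs[i] ≤ bs[mid.toNat] := pvSorted_le bs hs i mid.toNat hi hmidlen (by omega)
          omega
      · rw [if_neg hvlt]
        by_cases hvgt : bs[mid.toNat] > p
        · rw [if_pos hvgt]
          refine ih left (mid - 1) (by omega) h0 (by omega) (by omega) hlow ?_
          intro i hi hir
          rcases lt_or_ge right (i : Int) with h | h
          · exact hhigh i hi h
          · have : bs[mid.toNat] ≤ bs[i] := pvSorted_le bs hs mid.toNat i hmidlen hi (by omega)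
            omega
        · rw [if_neg hvgt]
          -- bs[mid] = p: B returns some p too
          obtain ⟨v, hv, hpv, hvk⟩ := pvAlt_between bs p hs mid.toNat hmidlen (by omega)
          have : v = p := by omega
          rw [hv, this]
          congr 1
          omega
    · exact ih left right (by omega) h0 hlr hrl hlow hhigh

-- on any list of length ≤ 2, sorted or not, the two programs agree
theorem pvShort_eq (bs : List Int) (p : Int) (h : bs.length ≤ 2) :
    find_nearest_boundary_py bs p = find_nearest_boundary_py_alt bs p := by
  match bs, h with
  | [], _ =>
    show pvFindLoop [] p 0 (-1) = _
    rw [pvFindLoop]; simp [find_nearest_boundary_py_alt]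
  | [a], _ =>
    show pvFindLoop [a] p 0 0 = _
    rw [pvFindLoop]
    simp [pvFindLoop, find_nearest_boundary_py_alt, PySem.List.pyGet?, PySem.List.pyIdx?,
      PySem.Int.floordiv]
    split_ifs <;> first | rfl | omega
  | [a, b], _ =>
    show pvFindLoop [a, b] p 0 1 = _
    rw [pvFindLoop]
    simp [pvFindLoop, find_nearest_boundary_py_alt, PySem.List.pyGet?, PySem.List.pyIdx?,
      PySem.Int.floordiv]
    split_ifs <;> first | rfl | omega

-- ===== VERDICT (by name: the statement is the Claim_ definition above) =====
theorem find_nearest_boundary_py_spec : Claim_equal_find_nearest_boundary_py := by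
  intro bs p _ hpre
  unfold Spec_find_nearest_boundary_py
  rcases hpre with hs | hshort
  · unfold find_nearest_boundary_py
    exact pvLoop_eq bs p hs ((bs.length : Int) - 1 + 1 - 0).toNat 0 ((bs.length : Int) - 1)
      (le_refl _) (le_refl _) (by omega) (by omega)
      (fun i hi hil => by omega)
      (fun i hi hir => by omega)
  · exact pvShort_eq bs p hshort
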